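-- pv_equiv track=rewrite | github.com/Exlany/lipro-hass | scripts/check_markdown_links.py | _normalize_destination
-- ===== SOURCE A (Python) =====
-- def _normalize_destination(raw_destination: str) -> str:
--     destination = raw_destination.strip()
--     if destination.startswith('<') and destination.endswith('>'):
--         destination = destination[1:-1].strip()
--     for separator in (' "', " '", ' ('):
--         if separator in destination:
--             destination = destination.split(separator, 1)[0].strip()
--     return destination
-- ===== SOURCE B (Python) =====
-- def _normalize_destination(raw_destination: str) -> str:
--     destination = raw_destination.strip()
--     if destination.startswith('<') and destination.endswith('>'):
--         destination = destination[1:-1].strip()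
--     for i in range(len(destination) - 1):
--         if destination[i] == ' ' and destination[i + 1] in '"\'(':
--             return destination[:i].strip()
--     return destination
-- ===== Notes on version B (the rewrite author's own statement) =====
-- stated objective: alternative
-- what changed: A runs three dependent split-and-strip passes, one per separator, each searching the result of the previous truncation; B makes a single left-to-right index scan for the earliest position where a space is followed by one of " ' ( and truncates and strips once there (correct because each separator is exactly a space followed by one of those characters, so the earliest such position equals the earliest separator A's passes ever cut at).
import Mathlib
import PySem

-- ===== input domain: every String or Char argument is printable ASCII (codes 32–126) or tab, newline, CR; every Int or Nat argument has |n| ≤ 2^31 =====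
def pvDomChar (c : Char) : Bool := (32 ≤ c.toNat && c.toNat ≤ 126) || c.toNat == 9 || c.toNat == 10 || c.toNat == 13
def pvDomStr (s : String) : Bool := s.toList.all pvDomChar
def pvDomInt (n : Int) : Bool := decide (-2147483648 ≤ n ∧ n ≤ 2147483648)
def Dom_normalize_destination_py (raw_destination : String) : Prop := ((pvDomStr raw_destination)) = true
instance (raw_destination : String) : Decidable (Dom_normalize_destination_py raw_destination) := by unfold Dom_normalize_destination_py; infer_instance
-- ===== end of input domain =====

-- B replaces A's three dependent split-and-strip passes by one left-to-right scan for the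
-- earliest " <quote-or-paren>" position, with a single truncation and strip
-- (objective: alternative decomposition, same cost class).

-- ===== PORT A =====
-- A: strip, unwrap <...>, then for each separator in (' "', " '", ' ('):
-- if present, split at its first occurrence, keep the head, strip again.
def normalize_destination_py (raw_destination : String) : String :=
  let d0 := PySem.Chars.strip raw_destination.toList
  let d1 := if PySem.Chars.startswith d0 ['<'] && PySem.Chars.endswith d0 ['>']
            then PySem.Chars.strip (PySem.Chars.slice d0 (some 1) (some (-1))) else d0
  let d2 := [[' ','"'], [' ','\''], [' ','(']].foldl
      (fun dest sep => if PySem.Chars.isIn sep dest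
                       then PySem.Chars.strip ((PySem.Chars.splitOnMax dest sep 1).headD [])
                       else dest) d1
  String.ofList d2

-- ===== PORT B =====
-- B-side helper: the index loop `for i in range(len(d)-1): if d[i]==' ' and d[i+1] in '"\'(' : …`
-- as the obvious structural scan over the character list, returning the first hit index.
def pvCut : List Char → Option Nat
  | a :: b :: rest =>
      if a = ' ' && (b = '"' || b = '\'' || b = '(')
      then some 0
      else (pvCut (b :: rest)).map (· + 1)
  | _ => none

-- B: strip, unwrap <...>, then scan once for the earliest " X" (X ∈ {", ', (}) position;
-- on a hit return strip of the prefix before it, otherwise the string unchanged.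
def normalize_destination_py_alt (raw_destination : String) : String :=
  let d0 := PySem.Chars.strip raw_destination.toList
  let d1 := if PySem.Chars.startswith d0 ['<'] && PySem.Chars.endswith d0 ['>']
            then PySem.Chars.strip (PySem.Chars.slice d0 (some 1) (some (-1))) else d0
  match pvCut d1 with
  | some i => String.ofList (PySem.Chars.strip (d1.take i))
  | none => String.ofList d1

-- ===== PRECONDITION & SPEC =====
def Spec_normalize_destination_py (raw_destination : String) (out : String) : Prop := out = normalize_destination_py_alt raw_destination
instance (raw_destination : String) (out : String) : Decidable (Spec_normalize_destination_py raw_destination out) := by unfold Spec_normalize_destination_py; infer_instance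

-- ===== CLAIM (what is proved, stated in full; the proofs are below) =====
def Claim_equal_normalize_destination_py : Prop := ∀ (raw_destination : String), Dom_normalize_destination_py raw_destination → Spec_normalize_destination_py raw_destination (normalize_destination_py raw_destination)

-- ===== LEMMAS AND PROOFS =====

-- proof-side notions: a "good" separator is a space followed by one non-space character,
-- pvOcc d c p says " c" occurs in d at position p, pvMinIdx is the (-1)-coded minimum
-- of the first-occurrence indices of the separators in d.
def pvGoodSep (sep : List Char) : Prop := ∃ c, sep = [' ', c] ∧ PySem.Chars.isspace c = false
def pvOcc (d : List Char) (c : Char) (p : Nat) : Prop := d[p]? = some ' ' ∧ d[p + 1]? = some c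
def pvMinIdx (seps : List (List Char)) (d : List Char) : Int :=
  match seps with
  | [] => -1
  | sep :: rest =>
    let i := PySem.Chars.find d sep
    let r := pvMinIdx rest d
    if i = -1 then r else if r = -1 then i else min i r

-- a two-character pattern is a prefix of d.drop p iff its characters sit at p and p+1
lemma pvOcc_iff (d : List Char) (a b : Char) (p : Nat) :
    [a, b] <+: d.drop p ↔ d[p]? = some a ∧ d[p + 1]? = some b := by
  have key : ∀ l : List Char, [a, b] <+: l ↔ l[0]? = some a ∧ l[1]? = some b := by
    intro l
    match l with
    | [] => simp
    | [x] => simp [List.prefix_iff_eq_take]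
    | x :: y :: t =>
      constructor
      · rintro ⟨r, hr⟩
        simp at hr
        simp [hr.1, hr.2.1]
      · rintro ⟨h1, h2⟩
        simp at h1 h2
        subst h1; subst h2
        exact ⟨t, rfl⟩
  rw [key]
  simp [List.getElem?_drop]

lemma pvFind_eq_neg (d sub : List Char) (h : ∀ p, ¬ sub <+: d.drop p) :
    PySem.Chars.find d sub = -1 := by
  rw [PySem.Chars.find_eq_neg_one_iff]
  intro hinf
  obtain ⟨j, hj⟩ := (PySem.Chars.exists_prefix_drop_iff_isIn sub d).mpr
    ((PySem.Chars.isIn_iff_infix sub d).mpr hinf)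
  exact h j hj

lemma pvFind_eq_coe (d sub : List Char) (n : Nat)
    (h1 : sub <+: d.drop n) (h2 : ∀ p < n, ¬ sub <+: d.drop p) :
    PySem.Chars.find d sub = n := by
  have hin : PySem.Chars.isIn sub d = true :=
    (PySem.Chars.exists_prefix_drop_iff_isIn sub d).mp ⟨n, h1⟩
  have hne : PySem.Chars.find d sub ≠ -1 := by
    rw [Ne, PySem.Chars.find_eq_neg_one_iff]
    exact fun hc => hc ((PySem.Chars.isIn_iff_infix sub d).mp hin)
  have h0 : 0 ≤ PySem.Chars.find d sub := by
    have := PySem.Chars.neg_one_le_find d sub; omega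
  obtain ⟨hp, hmin⟩ := PySem.Chars.find_spec h0
  rcases Nat.lt_trichotomy (PySem.Chars.find d sub).toNat n with h | h | h
  · exact absurd hp (h2 _ h)
  · omega
  · exact absurd h1 (hmin n h)

lemma pvFind_cons (c : Char) (rest sep : List Char) (h : ¬ sep <+: (c :: rest)) :
    PySem.Chars.find (c :: rest) sep =
      if PySem.Chars.find rest sep = -1 then -1 else PySem.Chars.find rest sep + 1 := by
  by_cases hr : PySem.Chars.find rest sep = -1
  · rw [if_pos hr]
    apply pvFind_eq_neg
    intro p
    match p with
    | 0 => simpa using h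
    | Nat.succ p =>
      intro hc
      rw [PySem.Chars.find_eq_neg_one_iff] at hr
      exact hr ((PySem.Chars.isIn_iff_infix sep rest).mp
        ((PySem.Chars.exists_prefix_drop_iff_isIn sep rest).mp ⟨p, by simpa using hc⟩))
  · rw [if_neg hr]
    have h0 : 0 ≤ PySem.Chars.find rest sep := by
      have := PySem.Chars.neg_one_le_find rest sep; omega
    obtain ⟨hp, hmin⟩ := PySem.Chars.find_spec h0
    have := pvFind_eq_coe (c :: rest) sep ((PySem.Chars.find rest sep).toNat + 1)
      (by simpa using hp)
      (by
        intro p hplt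
        match p with
        | 0 => simpa using h
        | Nat.succ p => intro hc; exact hmin p (by omega) (by simpa using hc))
    rw [this]; omega

-- strip structure
lemma pvRstrip_prefix (l : List Char) : PySem.Chars.rstrip l <+: l := by
  simp only [PySem.Chars.rstrip]
  have h1 := List.dropWhile_suffix (l := l.reverse) PySem.Chars.isspace
  have h2 := List.reverse_prefix (l₁ := List.dropWhile PySem.Chars.isspace l.reverse) (l₂ := l.reverse)
  rw [List.reverse_reverse] at h2
  exact h2.mpr h1

lemma pvLstrip_eq_self (l : List Char) (h : ∀ hl : 0 < l.length, PySem.Chars.isspace l[0] = false) :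
    PySem.Chars.lstrip l = l := by
  simp only [PySem.Chars.lstrip]
  rw [List.dropWhile_eq_self_iff]
  intro hl
  simp [h hl]

lemma pvStrip_lstrip (l : List Char) (h : PySem.Chars.strip l = l) : PySem.Chars.lstrip l = l := by
  have h1 : (PySem.Chars.rstrip (PySem.Chars.lstrip l)).length ≤ (PySem.Chars.lstrip l).length := by
    simp only [PySem.Chars.rstrip]
    have := (List.dropWhile_suffix (l := (PySem.Chars.lstrip l).reverse) PySem.Chars.isspace).length_le
    simpa using this
  have hsuff : PySem.Chars.lstrip l <:+ l := by
    simp only [PySem.Chars.lstrip]; exact List.dropWhile_suffix _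
  have hlen : (PySem.Chars.lstrip l).length = l.length := by
    have h3 : (PySem.Chars.strip l).length = l.length := by rw [h]
    have h2 := hsuff.length_le
    simp only [PySem.Chars.strip] at h3
    omega
  exact List.IsSuffix.eq_of_length hsuff hlen

lemma pvRstrip_head (l : List Char) (h : ∀ hl : 0 < l.length, PySem.Chars.isspace l[0] = false) :
    ∀ hl : 0 < (PySem.Chars.rstrip l).length, PySem.Chars.isspace (PySem.Chars.rstrip l)[0] = false := by
  intro hl
  have hpre := pvRstrip_prefix l
  rw [hpre.getElem hl]
  exact h (lt_of_lt_of_le hl hpre.length_le)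

lemma pvStrip_of_no_lead (l : List Char) (h : PySem.Chars.lstrip l = l) :
    PySem.Chars.strip l = PySem.Chars.rstrip l := by
  simp only [PySem.Chars.strip, h]

lemma pvDw_idem (p : Char → Bool) (l : List Char) :
    List.dropWhile p (List.dropWhile p l) = List.dropWhile p l := by
  induction l with
  | nil => simp
  | cons c t ih =>
    by_cases hc : p c
    · simp [hc, ih]
    · simp [hc]

lemma pvRstrip_idem (l : List Char) : PySem.Chars.rstrip (PySem.Chars.rstrip l) = PySem.Chars.rstrip l := by
  simp only [PySem.Chars.rstrip, List.reverse_reverse, pvDw_idem]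

lemma pvLstrip_head (l : List Char) :
    ∀ hl : 0 < (PySem.Chars.lstrip l).length, PySem.Chars.isspace (PySem.Chars.lstrip l)[0] = false := by
  intro hl
  simp only [PySem.Chars.lstrip] at hl ⊢
  have hne : List.dropWhile PySem.Chars.isspace l ≠ [] := List.ne_nil_of_length_pos hl
  have h2 := List.head_dropWhile_not PySem.Chars.isspace hne
  rwa [List.head_eq_getElem] at h2

lemma pvStrip_idem (l : List Char) : PySem.Chars.strip (PySem.Chars.strip l) = PySem.Chars.strip l := by
  have h1 : PySem.Chars.lstrip (PySem.Chars.strip l) = PySem.Chars.strip l := by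
    apply pvLstrip_eq_self
    simp only [PySem.Chars.strip]
    exact pvRstrip_head _ (pvLstrip_head l)
  simp only [PySem.Chars.strip] at h1 ⊢
  rw [h1, pvRstrip_idem]

lemma pvRstrip_spaces (l : List Char) (p : Nat) (ch : Char) (h1 : (PySem.Chars.rstrip l).length ≤ p)
    (h2 : l[p]? = some ch) : PySem.Chars.isspace ch = true := by
  have hsplit : l = PySem.Chars.rstrip l ++ (List.takeWhile PySem.Chars.isspace l.reverse).reverse := by
    simp only [PySem.Chars.rstrip]
    rw [← List.reverse_append, List.takeWhile_append_dropWhile, List.reverse_reverse]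
  rw [hsplit, List.getElem?_append_right h1] at h2
  have hmem : ch ∈ (List.takeWhile PySem.Chars.isspace l.reverse).reverse := List.mem_of_getElem? h2
  rw [List.mem_reverse] at hmem
  exact List.mem_takeWhile_imp hmem

-- split(sep, 1)[0]: the m = 0 tail of the splitter just emits the remainder
lemma pvGo_m0 (sep : List Char) (f : Nat) (l cur : List Char) (acc : List (List Char)) :
    PySem.Chars.splitOnMax.go sep f 0 l cur acc = acc.reverse ++ [cur.reverse ++ l] := by
  match f, l with
  | 0, l => simp [PySem.Chars.splitOnMax.go]
  | Nat.succ f, [] => simp [PySem.Chars.splitOnMax.go]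
  | Nat.succ f, c :: rest => simp [PySem.Chars.splitOnMax.go]

lemma pvGo_head (sep : List Char) (hsep : sep ≠ []) :
    ∀ (fuel : Nat) (l cur : List Char) (acc : List (List Char)), l.length < fuel →
    ∃ r, PySem.Chars.splitOnMax.go sep fuel 1 l cur acc =
      acc.reverse ++ (cur.reverse ++
        l.take (if PySem.Chars.find l sep = -1 then l.length else (PySem.Chars.find l sep).toNat)) :: r := by
  intro fuel
  induction fuel with
  | zero => intro l cur acc h; omega
  | succ f ih =>
    intro l cur acc h
    match l with
    | [] =>
      refine ⟨[], ?_⟩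
      have hf : PySem.Chars.find [] sep = -1 := by
        apply pvFind_eq_neg
        intro p hc
        simp at hc
        exact hsep (List.prefix_nil.mp (by simpa using hc))
      simp [PySem.Chars.splitOnMax.go, hf]
    | c :: rest =>
      by_cases hp : sep.isPrefixOf (c :: rest)
      · have hf : PySem.Chars.find (c :: rest) sep = 0 := by
          apply pvFind_eq_coe _ _ 0
          · simpa using (List.isPrefixOf_iff_prefix.mp hp)
          · omega
        refine ⟨[List.drop sep.length (c :: rest)], ?_⟩
        simp only [PySem.Chars.splitOnMax.go, hp]
        rw [pvGo_m0]
        simp [hf]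
      · have hnp : ¬ sep <+: (c :: rest) := fun hc => hp (List.isPrefixOf_iff_prefix.mpr hc)
        obtain ⟨r, hr⟩ := ih rest (c :: cur) acc (by simp at h ⊢; omega)
        refine ⟨r, ?_⟩
        simp only [PySem.Chars.splitOnMax.go, hp]
        simp only [if_neg (by decide : ¬ (1 : Nat) = 0)] at *
        rw [hr, pvFind_cons c rest sep hnp]
        by_cases hfr : PySem.Chars.find rest sep = -1
        · simp [hfr]
        · have h0 : 0 ≤ PySem.Chars.find rest sep := by
            have := PySem.Chars.neg_one_le_find rest sep; omega
          have h1 : ¬ (PySem.Chars.find rest sep + 1 = -1) := by omega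
          have h2 : (PySem.Chars.find rest sep + 1).toNat = (PySem.Chars.find rest sep).toNat + 1 := by omega
          simp [hfr, h1, h2, List.take_succ_cons]

lemma pvSplitHead (e sep : List Char) (hsep : sep ≠ []) :
    (PySem.Chars.splitOnMax e sep 1).headD [] =
      e.take (if PySem.Chars.find e sep = -1 then e.length else (PySem.Chars.find e sep).toNat) := by
  obtain ⟨r, hr⟩ := pvGo_head sep hsep (e.length + 1) e [] [] (by omega)
  simp only [PySem.Chars.splitOnMax]
  rw [if_neg (by omega)]
  simp only [Int.toNat_one]
  rw [hr]
  simp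

-- ==== the truncation step d' = strip (d.take t): prefix shape, trailing spaces,
-- and how occurrences / find / pvMinIdx of good separators transfer to d' ====

lemma pvTake_no_lead (d : List Char) (t : Nat) (hd : PySem.Chars.strip d = d) :
    PySem.Chars.lstrip (d.take t) = d.take t := by
  apply pvLstrip_eq_self
  intro hl
  have hdl : PySem.Chars.lstrip d = d := pvStrip_lstrip d hd
  have hhead : ∀ hl2 : 0 < d.length, PySem.Chars.isspace d[0] = false := by
    intro hl2
    have := (List.dropWhile_eq_self_iff).mp hdl hl2
    simpa using this
  have h0 : (d.take t)[0] = d[0]'(by simp at hl; omega) := List.getElem_take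
  rw [h0]
  exact hhead _

lemma pvStrip_take (d : List Char) (t : Nat) (hd : PySem.Chars.strip d = d) :
    PySem.Chars.strip (d.take t) = PySem.Chars.rstrip (d.take t) :=
  pvStrip_of_no_lead _ (pvTake_no_lead d t hd)

lemma pvDp_prefix (d : List Char) (t : Nat) (hd : PySem.Chars.strip d = d) :
    PySem.Chars.strip (d.take t) = d.take (PySem.Chars.strip (d.take t)).length ∧
      (PySem.Chars.strip (d.take t)).length ≤ t := by
  rw [pvStrip_take d t hd]
  have hpre : PySem.Chars.rstrip (d.take t) <+: d := (pvRstrip_prefix (d.take t)).trans (List.take_prefix t d)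
  constructor
  · exact List.prefix_iff_eq_take.mp hpre
  · have := (pvRstrip_prefix (d.take t)).length_le
    simp at this; omega

lemma pvDp_spaces (d : List Char) (t : Nat) (hd : PySem.Chars.strip d = d)
    (p : Nat) (ch : Char) (h1 : (PySem.Chars.strip (d.take t)).length ≤ p) (h2 : p < t)
    (h3 : d[p]? = some ch) : PySem.Chars.isspace ch = true := by
  rw [pvStrip_take d t hd] at h1
  apply pvRstrip_spaces (d.take t) p ch h1
  rw [List.getElem?_take, if_pos h2]
  exact h3

lemma pvOcc_transfer (d : List Char) (c : Char) (t : Nat)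
    (hd : PySem.Chars.strip d = d) (ht : pvOcc d c t)
    (c' : Char) (hc' : PySem.Chars.isspace c' = false) (p : Nat) :
    pvOcc (PySem.Chars.strip (d.take t)) c' p ↔ (pvOcc d c' p ∧ p < t) := by
  obtain ⟨hpre, hle⟩ := pvDp_prefix d t hd
  set j := (PySem.Chars.strip (d.take t)).length with hj
  constructor
  · rintro ⟨h1, h2⟩
    rw [hpre] at h1 h2
    rw [List.getElem?_take] at h1 h2
    by_cases hp1 : p + 1 < j
    · rw [if_pos (by omega)] at h1
      rw [if_pos hp1] at h2
      exact ⟨⟨h1, h2⟩, by omega⟩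
    · rw [if_neg hp1] at h2; exact absurd h2 (by simp)
  · rintro ⟨⟨h1, h2⟩, hpt⟩
    have hkey : p + 1 < j := by
      by_contra hc
      rcases Nat.lt_trichotomy (p + 1) t with hlt | heq | hgt
      · have := pvDp_spaces d t hd (p + 1) c' (by omega) hlt h2
        rw [this] at hc'; exact absurd hc' (by simp)
      · rw [heq] at h2
        rw [ht.1] at h2
        have : c' = ' ' := by simpa using h2.symm
        rw [this] at hc'
        exact absurd hc' (by simp [PySem.Chars.isspace])
      · omega
    constructor
    · rw [hpre, List.getElem?_take, if_pos (by omega)]; exact h1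
    · rw [hpre, List.getElem?_take, if_pos hkey]; exact h2

lemma pvFind_occ (d sep : List Char) (hs : pvGoodSep sep) (h : PySem.Chars.find d sep ≠ -1) :
    ∃ c, PySem.Chars.isspace c = false ∧ pvOcc d c (PySem.Chars.find d sep).toNat := by
  obtain ⟨c, hc, hsp⟩ := hs
  subst hc
  have h0 : 0 ≤ PySem.Chars.find d [' ', c] := by
    have := PySem.Chars.neg_one_le_find d [' ', c]; omega
  obtain ⟨hp, -⟩ := PySem.Chars.find_spec h0
  exact ⟨c, hsp, (pvOcc_iff d ' ' c _).mp hp⟩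

lemma pvFind_transfer (d : List Char) (c : Char) (t : Nat)
    (hd : PySem.Chars.strip d = d) (ht : pvOcc d c t)
    (sep' : List Char) (hs : pvGoodSep sep') :
    PySem.Chars.find (PySem.Chars.strip (d.take t)) sep' =
      if 0 ≤ PySem.Chars.find d sep' ∧ PySem.Chars.find d sep' < (t : Int)
      then PySem.Chars.find d sep' else -1 := by
  obtain ⟨c', hc', hsp⟩ := hs
  subst hc'
  by_cases hF : PySem.Chars.find d [' ', c'] = -1
  · rw [hF, if_neg (by omega)]
    apply pvFind_eq_neg
    intro p hc
    have hocc := (pvOcc_iff _ ' ' c' p).mp hc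
    have hoccd := ((pvOcc_transfer d c t hd ht c' hsp p).mp hocc).1
    rw [PySem.Chars.find_eq_neg_one_iff] at hF
    exact hF ((PySem.Chars.isIn_iff_infix _ d).mp
      ((PySem.Chars.exists_prefix_drop_iff_isIn _ d).mp ⟨p, (pvOcc_iff d ' ' c' p).mpr hoccd⟩))
  · have h0 : 0 ≤ PySem.Chars.find d [' ', c'] := by
      have := PySem.Chars.neg_one_le_find d [' ', c']; omega
    obtain ⟨hp, hmin⟩ := PySem.Chars.find_spec h0
    set n := (PySem.Chars.find d [' ', c']).toNat with hn
    have hFn : PySem.Chars.find d [' ', c'] = (n : Int) := by omega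
    by_cases hnt : n < t
    · rw [hFn, if_pos (by constructor <;> omega)]
      have h1 : pvOcc (PySem.Chars.strip (d.take t)) c' n :=
        (pvOcc_transfer d c t hd ht c' hsp n).mpr ⟨(pvOcc_iff d ' ' c' n).mp hp, hnt⟩
      rw [pvFind_eq_coe _ [' ', c'] n ((pvOcc_iff _ ' ' c' n).mpr h1) ?_]
      intro p hpn hc
      have := ((pvOcc_transfer d c t hd ht c' hsp p).mp ((pvOcc_iff _ ' ' c' p).mp hc)).1
      exact hmin p hpn ((pvOcc_iff d ' ' c' p).mpr this)
    · rw [if_neg (by omega)]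
      apply pvFind_eq_neg
      intro p hc
      have h2 := (pvOcc_transfer d c t hd ht c' hsp p).mp ((pvOcc_iff _ ' ' c' p).mp hc)
      exact hmin p (by omega) ((pvOcc_iff d ' ' c' p).mpr h2.1)

lemma pvMinIdx_nonneg (seps : List (List Char)) (d : List Char) : -1 ≤ pvMinIdx seps d := by
  induction seps with
  | nil => simp [pvMinIdx]
  | cons sep rest ih =>
    simp only [pvMinIdx]
    have := PySem.Chars.neg_one_le_find d sep
    split_ifs <;> simp_all

lemma pvMinIdx_attained (seps : List (List Char)) (d : List Char) (h : pvMinIdx seps d ≠ -1) :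
    ∃ sep ∈ seps, PySem.Chars.find d sep = pvMinIdx seps d := by
  induction seps with
  | nil => simp [pvMinIdx] at h
  | cons sep rest ih =>
    simp only [pvMinIdx] at h ⊢
    by_cases hi : PySem.Chars.find d sep = -1
    · simp only [hi, if_true] at h ⊢
      obtain ⟨s, hs, he⟩ := ih h
      exact ⟨s, by simp [hs], he⟩
    · by_cases hr : pvMinIdx rest d = -1
      · exact ⟨sep, by simp, by simp [hr]⟩
      · rw [if_neg hi, if_neg hr]
        rcases le_total (PySem.Chars.find d sep) (pvMinIdx rest d) with hle | hle
        · exact ⟨sep, by simp, by omega⟩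
        · obtain ⟨s, hs, he⟩ := ih hr
          exact ⟨s, by simp [hs], by rw [he]; omega⟩

lemma pvMinIdx_transfer (d : List Char) (c : Char) (t : Nat)
    (hd : PySem.Chars.strip d = d) (ht : pvOcc d c t)
    (seps : List (List Char)) (hg : ∀ s ∈ seps, pvGoodSep s) :
    pvMinIdx seps (PySem.Chars.strip (d.take t)) =
      if pvMinIdx seps d ≠ -1 ∧ pvMinIdx seps d < (t : Int) then pvMinIdx seps d else -1 := by
  induction seps with
  | nil => simp [pvMinIdx]
  | cons sep rest ih =>
    have hgs : pvGoodSep sep := hg sep (by simp)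
    have ihr := ih (fun s hs => hg s (by simp [hs]))
    have hft := pvFind_transfer d c t hd ht sep hgs
    have h1 := PySem.Chars.neg_one_le_find d sep
    have h2 := pvMinIdx_nonneg rest d
    simp only [pvMinIdx, hft, ihr]
    split_ifs <;> omega

-- A's sequential loop equals "truncate the fixed string at the minimum index, then strip"
lemma pvMain (seps : List (List Char)) (hg : ∀ s ∈ seps, pvGoodSep s) :
    ∀ d : List Char, PySem.Chars.strip d = d →
    seps.foldl (fun dest sep => if PySem.Chars.isIn sep dest
                  then PySem.Chars.strip ((PySem.Chars.splitOnMax dest sep 1).headD [])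
                  else dest) d =
      (if pvMinIdx seps d = -1 then d else PySem.Chars.strip (d.take (pvMinIdx seps d).toNat)) := by
  induction seps with
  | nil => intro d hd; simp [pvMinIdx]
  | cons sep rest ih =>
    intro d hd
    have hgs : pvGoodSep sep := hg sep (by simp)
    have ihr := ih (fun s hs => hg s (by simp [hs]))
    rw [List.foldl_cons]
    by_cases hi : PySem.Chars.find d sep = -1
    · have hisin : PySem.Chars.isIn sep d = false := by
        simp [PySem.Chars.isIn, hi]
      rw [hisin]
      simp only [Bool.false_eq_true, if_false]
      rw [ihr d hd]
      simp [pvMinIdx, hi]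
    · have hisin : PySem.Chars.isIn sep d = true := by
        simp [PySem.Chars.isIn, hi]
      rw [hisin]
      simp only [if_true]
      have hsepne : sep ≠ [] := by obtain ⟨c, hc, -⟩ := hgs; simp [hc]
      rw [pvSplitHead d sep hsepne, if_neg hi]
      set n := (PySem.Chars.find d sep).toNat with hn
      set d' := PySem.Chars.strip (d.take n) with hd'def
      have hd' : PySem.Chars.strip d' = d' := pvStrip_idem (d.take n)
      obtain ⟨c, hcsp, hocc⟩ := pvFind_occ d sep hgs hi
      have hmt := pvMinIdx_transfer d c n hd hocc rest (fun s hs => hg s (by simp [hs]))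
      rw [ihr d' hd']
      have hi0 : 0 ≤ PySem.Chars.find d sep := by
        have := PySem.Chars.neg_one_le_find d sep; omega
      have hin : PySem.Chars.find d sep = (n : Int) := by omega
      set m := pvMinIdx rest d with hm
      have hm1 := pvMinIdx_nonneg rest d
      by_cases hcase : m ≠ -1 ∧ m < (n : Int)
      · rw [hmt, if_pos hcase]
        obtain ⟨sep', hsep'mem, hfindm⟩ := pvMinIdx_attained rest d hcase.1
        obtain ⟨c'', hcsp'⟩ := pvFind_occ d sep' (hg sep' (by simp [hsep'mem])) (by rw [hfindm]; exact hcase.1)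
        rw [hfindm] at hcsp'
        have hoccd' : pvOcc d' c'' m.toNat :=
          (pvOcc_transfer d c n hd hocc c'' hcsp'.1 m.toNat).mpr ⟨hcsp'.2, by omega⟩
        have hlen : m.toNat + 1 < d'.length := by
          have := hoccd'.2
          exact (List.getElem?_eq_some_iff.mp this).1
        obtain ⟨hpre, hle⟩ := pvDp_prefix d n hd
        rw [← hd'def] at hpre hle
        have htake : d.take m.toNat = List.take m.toNat d' := by
          conv_rhs => rw [hpre]
          rw [List.take_take]
          congr 1
          omega
        rw [← htake]
        have hrhs : pvMinIdx (sep :: rest) d = m := by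
          simp only [pvMinIdx, ← hm, if_neg hi, if_neg hcase.1]
          omega
        rw [hrhs, if_neg hcase.1]
        rw [if_neg hcase.1]
      · rw [hmt, if_neg hcase]
        have hrhs : pvMinIdx (sep :: rest) d = PySem.Chars.find d sep := by
          simp only [pvMinIdx, ← hm, if_neg hi]
          by_cases h2 : m = -1
          · simp [h2]
          · rw [if_neg h2]
            omega
        rw [if_pos rfl, hrhs, if_neg hi, hin]
        simp only [Int.toNat_natCast]
        exact hd'def

-- ==== relating B's single scan pvCut to pvMinIdx of the three separators ====

lemma pvFind_short (d s : List Char) (h : d.length < s.length) : PySem.Chars.find d s = -1 := by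
  apply pvFind_eq_neg
  intro p hc
  have h1 := hc.length_le
  rw [List.length_drop] at h1
  omega

lemma pvPrefix2 (a b x y : Char) (t : List Char) : [x, y] <+: (a :: b :: t) ↔ a = x ∧ b = y := by
  constructor
  · rintro ⟨r, hr⟩
    simp at hr
    exact ⟨hr.1.symm, hr.2.1.symm⟩
  · rintro ⟨h1, h2⟩
    subst h1; subst h2
    exact ⟨t, rfl⟩

lemma pvMinIdx_short (d : List Char) (h : d.length < 2) :
    pvMinIdx [[' ','"'], [' ','\''], [' ','(']] d = -1 := by
  simp only [pvMinIdx]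
  rw [pvFind_short d [' ','"'] (by simpa using h),
      pvFind_short d [' ','\''] (by simpa using h),
      pvFind_short d [' ','('] (by simpa using h)]
  simp

lemma pvMinIdx_match0 (a b : Char) (t : List Char)
    (ha : a = ' ') (hb : b = '"' ∨ b = '\'' ∨ b = '(') :
    pvMinIdx [[' ','"'], [' ','\''], [' ','(']] (a :: b :: t) = 0 := by
  subst ha
  have hkey : ∃ s ∈ [[' ','"'], [' ','\''], [' ','(']],
      PySem.Chars.find (' ' :: b :: t) s = 0 := by
    rcases hb with h | h | h <;> subst h
    · exact ⟨[' ','"'], by simp, pvFind_eq_coe _ _ 0 (by simp) (by omega)⟩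
    · exact ⟨[' ','\''], by simp, pvFind_eq_coe _ _ 0 (by simp) (by omega)⟩
    · exact ⟨[' ','('], by simp, pvFind_eq_coe _ _ 0 (by simp) (by omega)⟩
  obtain ⟨s, hs, h0⟩ := hkey
  have b1 := PySem.Chars.neg_one_le_find (' ' :: b :: t) [' ','"']
  have b2 := PySem.Chars.neg_one_le_find (' ' :: b :: t) [' ','\'']
  have b3 := PySem.Chars.neg_one_le_find (' ' :: b :: t) [' ','(']
  simp only [pvMinIdx]
  simp at hs
  rcases hs with h | h | h <;> rw [h] at h0 <;> split_ifs <;> omega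

set_option maxHeartbeats 1000000 in
lemma pvMinIdx_shift (a b : Char) (t : List Char)
    (h : ¬ (a = ' ' ∧ (b = '"' ∨ b = '\'' ∨ b = '('))) :
    pvMinIdx [[' ','"'], [' ','\''], [' ','(']] (a :: b :: t) =
      (if pvMinIdx [[' ','"'], [' ','\''], [' ','(']] (b :: t) = -1 then -1
       else pvMinIdx [[' ','"'], [' ','\''], [' ','(']] (b :: t) + 1) := by
  have hnp : ∀ s ∈ [[' ','"'], [' ','\''], [' ','(']], ¬ s <+: (a :: b :: t) := by
    intro s hs hc
    simp at hs
    rcases hs with hh | hh | hh <;> subst hh <;>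
      · rw [pvPrefix2] at hc
        exact h ⟨hc.1, by simp [hc.2]⟩
  have f1 := pvFind_cons a (b :: t) [' ','"'] (hnp _ (by simp))
  have f2 := pvFind_cons a (b :: t) [' ','\''] (hnp _ (by simp))
  have f3 := pvFind_cons a (b :: t) [' ','('] (hnp _ (by simp))
  have b1 := PySem.Chars.neg_one_le_find (b :: t) [' ','"']
  have b2 := PySem.Chars.neg_one_le_find (b :: t) [' ','\'']
  have b3 := PySem.Chars.neg_one_le_find (b :: t) [' ','(']
  simp only [pvMinIdx, f1, f2, f3]
  split_ifs <;> omega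

lemma pvCut_minIdx : ∀ d : List Char,
    pvMinIdx [[' ','"'], [' ','\''], [' ','(']] d =
      (match pvCut d with | none => -1 | some n => (n : Int)) := by
  intro d
  induction d with
  | nil => simp [pvCut, pvMinIdx_short]
  | cons a t ih =>
    match t, ih with
    | [], _ => simp [pvCut, pvMinIdx_short]
    | b :: t, ih =>
      by_cases h : a = ' ' && (b = '"' || b = '\'' || b = '(')
      · simp only [Bool.and_eq_true, Bool.or_eq_true, decide_eq_true_eq] at h
        rw [pvMinIdx_match0 a b t h.1 (or_assoc.mp h.2)]
        have hcut : pvCut (a :: b :: t) = some 0 := by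
          simp [pvCut, h.1]
          rcases or_assoc.mp h.2 with hh | hh | hh <;> simp [hh]
        rw [hcut]
        simp
      · have h' : ¬ (a = ' ' ∧ (b = '"' ∨ b = '\'' ∨ b = '(')) := by
          simp only [Bool.and_eq_true, Bool.or_eq_true, decide_eq_true_eq] at h
          tauto
        rw [pvMinIdx_shift a b t h']
        have hm := pvMinIdx_nonneg [[' ','"'], [' ','\''], [' ','(']] (b :: t)
        have hcut : pvCut (a :: b :: t) = (pvCut (b :: t)).map (· + 1) := by
          simp [pvCut, h]
        rw [hcut]
        cases hc : pvCut (b :: t) with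
        | none =>
          have ih' : pvMinIdx [[' ','"'], [' ','\''], [' ','(']] (b :: t) = -1 := by
            rw [ih, hc]
          simp [ih']
        | some n =>
          have ih' : pvMinIdx [[' ','"'], [' ','\''], [' ','(']] (b :: t) = (n : Int) := by
            rw [ih, hc]
          rw [ih']
          simp only [Option.map_some]
          rw [if_neg (by omega)]
          push_cast
          ring

-- ===== VERDICT (by name: the statement is the Claim_ definition above) =====
theorem normalize_destination_py_spec : Claim_equal_normalize_destination_py := by
  intro raw _
  show normalize_destination_py raw = normalize_destination_py_alt raw
  unfold normalize_destination_py normalize_destination_py_alt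
  dsimp only
  set d0 := PySem.Chars.strip raw.toList with hd0
  set d1 := (if PySem.Chars.startswith d0 ['<'] && PySem.Chars.endswith d0 ['>']
            then PySem.Chars.strip (PySem.Chars.slice d0 (some 1) (some (-1))) else d0) with hd1def
  have hd1 : PySem.Chars.strip d1 = d1 := by
    rw [hd1def]
    split_ifs
    · exact pvStrip_idem _
    · exact pvStrip_idem _
  have hg : ∀ s ∈ [[' ','"'], [' ','\''], [' ','(']], pvGoodSep s := by
    intro s hs
    simp at hs
    rcases hs with h | h | h <;> subst h
    · exact ⟨'"', rfl, by decide⟩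
    · exact ⟨'\'', rfl, by decide⟩
    · exact ⟨'(', rfl, by decide⟩
  rw [pvMain _ hg d1 hd1]
  have hC := pvCut_minIdx d1
  cases hc : pvCut d1 with
  | none =>
    have hC' : pvMinIdx [[' ','"'], [' ','\''], [' ','(']] d1 = -1 := by rw [hC, hc]
    rw [if_pos hC']
  | some n =>
    have hC' : pvMinIdx [[' ','"'], [' ','\''], [' ','(']] d1 = (n : Int) := by rw [hC, hc]
    rw [hC', if_neg (by omega)]
    simp
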